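-- pv_equiv track=rewrite | github.com/hilywu140-sudo/ai_interviewer | backend/services/markdown_formatter.py | format_optimized_answer
-- ===== SOURCE A (Python) =====
-- def format_optimized_answer(text: str) -> str:
--     """
--     格式化优化后的答案
--
--     AI 生成的优化答案通常已经有较好的结构，
--     主要确保段落分隔正确。
--
--     Args:
--         text: 优化后的答案文本
--
--     Returns:
--         格式化后的 Markdown 文本
--     """
--     if not text:
--         return ""
--
--     # 标准化换行符
--     text = text.replace('\r\n', '\n').replace('\r', '\n')
--
--     # 确保段落之间有空行
--     # 将单个换行后跟文字的情况改为双换行（除非是列表项）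
--     lines = text.split('\n')
--     result_lines = []
--
--     for i, line in enumerate(lines):
--         result_lines.append(line)
--
--         # 如果当前行有内容，下一行也有内容，且下一行不是列表项
--         if (i < len(lines) - 1 and
--             line.strip() and
--             lines[i + 1].strip() and
--             not lines[i + 1].strip().startswith(('-', '*', '•', '1.', '2.', '3.'))):
--             # 检查是否已经有空行
--             if line.strip() and not line.strip().endswith(':'):
--                 result_lines.append('')  # 添加空行
--
--     return '\n'.join(result_lines)
-- ===== SOURCE B (Python) =====
-- def format_optimized_answer(text: str) -> str:
--     if not text:
--         return ""
--
--     rest = text.replace('\r\n', '\n').replace('\r', '\n')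
--
--     out = []
--     while True:
--         line, found, rest = rest.partition('\n')
--         out.append(line)
--         if not found:
--             break
--         here = line.strip()
--         there = rest.partition('\n')[0].strip()
--         if (here and there and not here.endswith(':')
--                 and not there.startswith(('-', '*', '\u2022', '1.', '2.', '3.'))):
--             out.append('\n\n')
--         else:
--             out.append('\n')
--     return ''.join(out)
-- ===== Notes on version B (the rewrite author's own statement) =====
-- stated objective: alternative
-- what changed: B never builds a line list: instead of A's split('\n'), index-driven enumerate loop that appends '' entries into a result list and a final '\n'.join, B streams over the raw string with str.partition('\n'), peeling one line at a time, emitting each line with an explicit '\n' or '\n\n' separator directly, and concatenating with ''.join.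
import Mathlib
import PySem

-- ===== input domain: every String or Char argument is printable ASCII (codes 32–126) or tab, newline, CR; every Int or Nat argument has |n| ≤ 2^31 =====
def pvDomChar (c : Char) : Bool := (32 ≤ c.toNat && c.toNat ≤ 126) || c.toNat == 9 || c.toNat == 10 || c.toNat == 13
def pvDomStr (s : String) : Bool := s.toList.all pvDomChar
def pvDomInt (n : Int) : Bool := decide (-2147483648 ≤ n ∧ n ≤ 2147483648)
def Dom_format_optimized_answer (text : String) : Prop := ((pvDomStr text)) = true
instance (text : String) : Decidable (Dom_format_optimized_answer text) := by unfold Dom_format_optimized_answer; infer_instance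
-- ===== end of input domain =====

-- B replaces A's split-into-a-line-list / enumerate-indexed loop / '\n'.join pipeline by a
-- streaming scan of the raw string that peels one line at a time with str.partition('\n') and
-- emits explicit '\n' / '\n\n' separators (objective: alternative structure, same cost).

-- ===== PORT A =====
-- loop body of A's for-loop, factored out (same steps: append line, then maybe append '')
def pvAIsListItem (s : String) : Bool :=
  PySem.Str.startswith s "-" || PySem.Str.startswith s "*" ||
  PySem.Str.startswith s "•" || PySem.Str.startswith s "1." ||
  PySem.Str.startswith s "2." || PySem.Str.startswith s "3."

def pvAStep (lines : List String) (acc : List String) (p : Int × String) : List String :=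
  let acc := acc ++ [p.2]
  let nxt := (PySem.List.pyGet? lines (p.1 + 1)).getD ""
  if decide (p.1 < (lines.length : Int) - 1) &&
     (PySem.Str.strip p.2 != "") &&
     (PySem.Str.strip nxt != "") &&
     !(pvAIsListItem (PySem.Str.strip nxt)) then
    if (PySem.Str.strip p.2 != "") && !(PySem.Str.endswith (PySem.Str.strip p.2) ":") then
      acc ++ [""]
    else acc
  else acc

def format_optimized_answer (text : String) : String :=
  if text = "" then ""
  else
    let t := PySem.Str.replace (PySem.Str.replace text "\r\n" "\n") "\r" "\n"
    let lines := (PySem.Str.split? t "\n").getD []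
    let result_lines := (PySem.List.enumerate lines).foldl (pvAStep lines) []
    PySem.Str.join "\n" result_lines

-- ===== PORT B =====
-- B works on the raw character stream; the Python-level strings 'here'/'there' become List Char
def pvListItemC (s : List Char) : Bool :=
  PySem.Chars.startswith s ['-'] || PySem.Chars.startswith s ['*'] ||
  PySem.Chars.startswith s ['•'] || PySem.Chars.startswith s ['1', '.'] ||
  PySem.Chars.startswith s ['2', '.'] || PySem.Chars.startswith s ['3', '.']

-- the 'if here and there and not here.endswith(':') and not there.startswith((...))' test of B
def pvCondC (line nxt : List Char) : Bool :=
  (PySem.Chars.strip line != []) && (PySem.Chars.strip nxt != []) &&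
  !(PySem.Chars.endswith (PySem.Chars.strip line) [':']) &&
  !(pvListItemC (PySem.Chars.strip nxt))

def pvSepC (line nxt : List Char) : List Char :=
  if pvCondC line nxt then ['\n', '\n'] else ['\n']

-- B's while loop: rest.partition('\n') ported exactly (single-char separator) as
-- takeWhile (≠ '\n') / dropWhile (≠ '\n'); 'found' is whether the dropWhile part is nonempty
def pvBGo (rest : List Char) : List Char :=
  let line := rest.takeWhile (fun c => c != '\n')
  match _h : rest.dropWhile (fun c => c != '\n') with
  | [] => line
  | _ :: rest2 =>
      line ++ pvSepC line (rest2.takeWhile (fun c => c != '\n')) ++ pvBGo rest2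
termination_by rest.length
decreasing_by
  have hle := List.length_dropWhile_le (fun c => c != '\n') rest
  rw [_h] at hle; simp at hle; omega

def format_optimized_answer_alt (text : String) : String :=
  if text = "" then ""
  else
    let t := PySem.Str.replace (PySem.Str.replace text "\r\n" "\n") "\r" "\n"
    String.ofList (pvBGo t.toList)

-- ===== PRECONDITION & SPEC =====
def Spec_format_optimized_answer (text : String) (out : String) : Prop := out = format_optimized_answer_alt text
instance (text : String) (out : String) : Decidable (Spec_format_optimized_answer text out) := by unfold Spec_format_optimized_answer; infer_instance

-- ===== CLAIM (what is proved, stated in full; the proofs are below) =====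
def Claim_equal_format_optimized_answer : Prop := ∀ (text : String), Dom_format_optimized_answer text → Spec_format_optimized_answer text (format_optimized_answer text)

-- ===== LEMMAS AND PROOFS =====

-- ---- A side: the loop over enumerate(lines) produces pvAIns lines ----

-- the boundary condition, String level (A's ordering after boolean normalization)
def pvCond (a b : String) : Bool :=
  (PySem.Str.strip a != "") && (PySem.Str.strip b != "") &&
  !(PySem.Str.endswith (PySem.Str.strip a) ":") && !(pvAIsListItem (PySem.Str.strip b))

-- what A's loop produces, recursively over the lines
def pvAIns : List String → List String
  | [] => []
  | [x] => [x]
  | x :: y :: rest => x :: ((if pvCond x y then [""] else []) ++ pvAIns (y :: rest))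

theorem pvAStep_last (pre acc : List String) (x : String) :
    pvAStep (pre ++ [x]) acc ((pre.length : Int), x) = acc ++ [x] := by
  simp [pvAStep]

theorem pvBoolJuggle (p q e m : Bool) (acc : List String) (x : String) :
    (if (p && q && !m) = true then
       (if (p && !e) = true then acc ++ [x] ++ [""] else acc ++ [x])
     else acc ++ [x])
      = acc ++ x :: (if (p && q && !e && !m) = true then [""] else []) := by
  cases p <;> cases q <;> cases e <;> cases m <;> simp

theorem pvAStep_cons (pre acc : List String) (x y : String) (rest : List String) :
    pvAStep (pre ++ x :: y :: rest) acc ((pre.length : Int), x)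
      = acc ++ x :: (if pvCond x y then [""] else []) := by
  have hlt : decide ((pre.length : Int) < (((pre ++ x :: y :: rest).length : Nat) : Int) - 1) = true := by
    simp only [decide_eq_true_eq, List.length_append, List.length_cons]
    push_cast
    omega
  have hget : PySem.List.pyGet? (pre ++ x :: y :: rest) ((pre.length : Int) + 1) = some y := by
    have h1 : ((pre.length : Int) + 1) = ((pre.length + 1 : Nat) : Int) := by push_cast; ring
    rw [h1, PySem.List.pyGet?_natCast]
    rw [List.getElem?_append_right (by omega)]
    simp
  simp only [pvAStep, pvCond, hget, Option.getD_some, hlt, Bool.true_and]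
  exact pvBoolJuggle (PySem.Str.strip x != "") (PySem.Str.strip y != "")
    (PySem.Str.endswith (PySem.Str.strip x) ":") (pvAIsListItem (PySem.Str.strip y)) acc x

theorem pvAloop (suf : List String) : ∀ (pre acc : List String) (x : String),
    (PySem.List.enumerate (x :: suf) ((pre.length : Nat) : Int)).foldl
        (pvAStep (pre ++ x :: suf)) acc
      = acc ++ pvAIns (x :: suf) := by
  induction suf with
  | nil =>
    intro pre acc x
    rw [PySem.List.enumerate_cons, PySem.List.enumerate_nil]
    simp [pvAStep_last, pvAIns]
  | cons y rest ih =>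
    intro pre acc x
    rw [PySem.List.enumerate_cons]
    simp only [List.foldl_cons]
    rw [pvAStep_cons pre acc x y rest]
    have hre : pre ++ x :: y :: rest = (pre ++ [x]) ++ y :: rest := by simp
    rw [hre]
    have hlen : ((pre.length : Nat) : Int) + 1 = (((pre ++ [x]).length : Nat) : Int) := by
      simp
    rw [hlen, ih (pre ++ [x])]
    simp [pvAIns]

-- ---- characterizing splitOn _ ['\n'] by a simple structural recursion ----

def pvConsHead (p : List Char) : List (List Char) → List (List Char)
  | [] => [p]
  | h :: t => (p ++ h) :: t

def pvSplit : List Char → List (List Char)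
  | [] => [[]]
  | c :: r => if c = '\n' then [] :: pvSplit r else pvConsHead [c] (pvSplit r)

theorem pvSplit_ne_nil (cs : List Char) : pvSplit cs ≠ [] := by
  cases cs with
  | nil => simp [pvSplit]
  | cons c r =>
    simp only [pvSplit]
    split
    · simp
    · rcases h : pvSplit r with _ | ⟨a, t⟩ <;> simp [pvConsHead]

theorem pvConsHead_nil {M : List (List Char)} (h : M ≠ []) : pvConsHead [] M = M := by
  cases M with
  | nil => exact absurd rfl h
  | cons a t => simp [pvConsHead]

theorem pvConsHead_consHead (p q : List Char) (M : List (List Char)) :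
    pvConsHead p (pvConsHead q M) = pvConsHead (p ++ q) M := by
  cases M <;> simp [pvConsHead]

theorem pvGo_spec (fuel : Nat) : ∀ (l cur : List Char) (acc : List (List Char)),
    l.length < fuel →
    PySem.Chars.splitOn.go ['\n'] fuel l cur acc
      = acc.reverse ++ pvConsHead cur.reverse (pvSplit l) := by
  induction fuel with
  | zero => intro l cur acc h; omega
  | succ f ih =>
    intro l cur acc h
    cases l with
    | nil =>
      rw [PySem.Chars.splitOn.go.eq_def]
      simp [pvSplit, pvConsHead]
    | cons c rest =>
      rw [PySem.Chars.splitOn.go.eq_def]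
      simp only []
      by_cases hc : c = '\n'
      · subst hc
        have hp : List.isPrefixOf ['\n'] ('\n' :: rest) = true := by
          simp [List.isPrefixOf]
        rw [if_pos hp]
        have : List.drop (['\n'] : List Char).length ('\n' :: rest) = rest := by simp
        rw [this, ih rest [] (cur.reverse :: acc) (by simp at h ⊢; omega)]
        rw [List.reverse_nil, pvConsHead_nil (pvSplit_ne_nil rest)]
        rw [show pvSplit ('\n' :: rest) = [] :: pvSplit rest from by simp [pvSplit]]
        simp [pvConsHead]
      · have hp : List.isPrefixOf ['\n'] (c :: rest) = false := by
          simp only [List.isPrefixOf, Bool.and_eq_false_iff]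
          exact Or.inl (by simp; exact fun h => hc h.symm)
        rw [if_neg (by simp [hp])]
        rw [ih rest (c :: cur) acc (by simp at h ⊢; omega)]
        have : pvSplit (c :: rest) = pvConsHead [c] (pvSplit rest) := by
          simp [pvSplit, hc]
        rw [this, pvConsHead_consHead]
        simp

theorem pvSplitOn_newline (cs : List Char) :
    PySem.Chars.splitOn cs ['\n'] = pvSplit cs := by
  unfold PySem.Chars.splitOn
  rw [pvGo_spec (cs.length + 1) cs [] [] (by omega)]
  simp [pvConsHead_nil (pvSplit_ne_nil cs)]

theorem pvSplit_head (cs : List Char) :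
    ∃ t, pvSplit cs = cs.takeWhile (fun c => c != '\n') :: t := by
  induction cs with
  | nil => exact ⟨[], rfl⟩
  | cons c r ih =>
    by_cases hc : c = '\n'
    · subst hc
      exact ⟨pvSplit r, by simp [pvSplit, List.takeWhile]⟩
    · obtain ⟨t, ht⟩ := ih
      have hb : (c != '\n') = true := by simp [hc]
      exact ⟨t, by simp [pvSplit, hc, ht, pvConsHead, List.takeWhile, hb]⟩

theorem pvSplit_no_newline {a : List Char} (ha : '\n' ∉ a) : pvSplit a = [a] := by
  induction a with
  | nil => rfl
  | cons c b ih =>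
    have hc : c ≠ '\n' := by intro h; exact ha (h ▸ List.mem_cons_self ..)
    have hb : '\n' ∉ b := fun h => ha (List.mem_cons_of_mem _ h)
    simp [pvSplit, hc, ih hb, pvConsHead]

theorem pvSplit_cons_newline (a r : List Char) (ha : '\n' ∉ a) :
    pvSplit (a ++ '\n' :: r) = a :: pvSplit r := by
  induction a with
  | nil => simp [pvSplit]
  | cons c b ih =>
    have hc : c ≠ '\n' := by intro h; exact ha (h ▸ List.mem_cons_self ..)
    have hb : '\n' ∉ b := fun h => ha (List.mem_cons_of_mem _ h)
    simp only [List.cons_append, pvSplit, if_neg hc, ih hb, pvConsHead, List.nil_append]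

-- ---- the String-level condition equals the char-level one ----

theorem pvStr_ne_empty (s : String) : (s != "") = (s.toList != []) := by
  rcases Bool.dichotomy (s.toList != []) with h | h <;> rw [h]
  · simp only [bne_eq_false_iff_eq] at h ⊢
    rw [← String.toList_inj, h]; rfl
  · simp only [bne_iff_ne, ne_eq] at h ⊢
    intro hs; subst hs; exact h rfl

theorem pvCond_ofList (a b : List Char) :
    pvCond (String.ofList a) (String.ofList b) = pvCondC a b := by
  unfold pvCond pvCondC pvAIsListItem pvListItemC
  rw [pvStr_ne_empty, pvStr_ne_empty]
  simp [PySem.Str.strip, PySem.Str.endswith, PySem.Str.startswith]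

-- ---- char-level image of pvAIns ----

def pvAInsC : List (List Char) → List (List Char)
  | [] => []
  | [x] => [x]
  | x :: y :: rest => x :: ((if pvCondC x y then [[]] else []) ++ pvAInsC (y :: rest))

theorem pvAIns_map (M : List (List Char)) :
    pvAIns (M.map String.ofList) = (pvAInsC M).map String.ofList := by
  induction M with
  | nil => rfl
  | cons x tail ih =>
    cases tail with
    | nil => rfl
    | cons y rest =>
      simp only [List.map_cons] at ih ⊢
      have e1 : pvAIns (String.ofList x :: String.ofList y :: (rest.map String.ofList))
          = String.ofList x :: ((if pvCondC x y then [String.ofList []] else [])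
            ++ pvAIns (String.ofList y :: rest.map String.ofList)) := by
        rw [show pvAIns (String.ofList x :: String.ofList y :: (rest.map String.ofList))
              = String.ofList x :: ((if pvCond (String.ofList x) (String.ofList y) then [""] else [])
                ++ pvAIns (String.ofList y :: rest.map String.ofList)) from rfl, pvCond_ofList]
      rw [e1, ih]
      rw [show pvAInsC (x :: y :: rest)
            = x :: ((if pvCondC x y then [[]] else []) ++ pvAInsC (y :: rest)) from rfl]
      rcases Bool.dichotomy (pvCondC x y) with h | h <;> rw [h] <;> simp

theorem pvAInsC_ne_nil (x : List Char) (t : List (List Char)) : pvAInsC (x :: t) ≠ [] := by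
  cases t <;> simp [pvAInsC]

-- unfolding equations for pvBGo, driven by the shape of dropWhile
theorem pvBGo_nil {cs : List Char} (hd : cs.dropWhile (fun c => c != '\n') = []) :
    pvBGo cs = cs.takeWhile (fun c => c != '\n') := by
  rw [pvBGo]
  split
  · rfl
  · rename_i x rest2 h
    rw [hd] at h
    cases h

theorem pvBGo_cons {cs : List Char} {c : Char} {rest : List Char}
    (hd : cs.dropWhile (fun c => c != '\n') = c :: rest) :
    pvBGo cs = cs.takeWhile (fun c => c != '\n')
      ++ pvSepC (cs.takeWhile (fun c => c != '\n')) (rest.takeWhile (fun c => c != '\n'))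
      ++ pvBGo rest := by
  rw [pvBGo]
  split
  · rename_i h
    rw [hd] at h
    cases h
  · rename_i x rest2 h
    rw [hd] at h
    cases h
    rfl

-- ---- the heart: B's streaming scan equals '\n'-joining A's inserted line list ----

theorem pvBGo_eq (cs : List Char) :
    pvBGo cs = PySem.Chars.join ['\n'] (pvAInsC (pvSplit cs)) := by
  have hsplit := List.takeWhile_append_dropWhile (p := fun c => c != '\n') (l := cs)
  have hnl : '\n' ∉ cs.takeWhile (fun c => c != '\n') := by
    intro hm
    have := List.mem_takeWhile_imp hm
    simp at this
  rcases hd : cs.dropWhile (fun c => c != '\n') with _ | ⟨c, rest⟩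
  · -- no newline: a single line
    rw [hd, List.append_nil] at hsplit
    rw [pvBGo_nil hd]
    conv_rhs => rw [← hsplit]
    rw [pvSplit_no_newline hnl]
    simp [pvAInsC, PySem.Chars.join_singleton]
  · have hc : c = '\n' := by
      have hne : cs.dropWhile (fun c => c != '\n') ≠ [] := by rw [hd]; simp
      have hh := List.head_dropWhile_not (fun c => c != '\n') hne
      simp [hd] at hh
      exact hh
    subst hc
    rw [hd] at hsplit
    have hlen : rest.length < cs.length := by
      have hle := List.length_dropWhile_le (fun c => c != '\n') cs
      rw [hd] at hle; simp at hle; omega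
    have ih := pvBGo_eq rest
    rw [pvBGo_cons hd]
    conv_rhs => rw [← hsplit]
    rw [pvSplit_cons_newline _ _ hnl]
    obtain ⟨t, ht⟩ := pvSplit_head rest
    rw [ht]
    rw [show pvAInsC (cs.takeWhile (fun c => c != '\n') :: rest.takeWhile (fun c => c != '\n') :: t)
          = cs.takeWhile (fun c => c != '\n')
              :: ((if pvCondC (cs.takeWhile (fun c => c != '\n')) (rest.takeWhile (fun c => c != '\n')) then [[]] else [])
                ++ pvAInsC (rest.takeWhile (fun c => c != '\n') :: t)) from rfl]
    rw [ih, ht]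
    rcases hq : pvAInsC (rest.takeWhile (fun c => c != '\n') :: t) with _ | ⟨p, P⟩
    · exact absurd hq (pvAInsC_ne_nil _ _)
    · unfold pvSepC
      rcases Bool.dichotomy (pvCondC (cs.takeWhile (fun c => c != '\n')) (rest.takeWhile (fun c => c != '\n'))) with h | h <;>
        rw [h] <;>
        simp [PySem.Chars.join_cons_cons]
termination_by cs.length

-- the whole pipeline, for the normalized string t
theorem pvMain (t : String) :
    PySem.Str.join "\n" ((PySem.List.enumerate ((PySem.Str.split? t "\n").getD [])).foldl
        (pvAStep ((PySem.Str.split? t "\n").getD [])) [])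
      = String.ofList (pvBGo t.toList) := by
  have hlines : (PySem.Str.split? t "\n").getD [] = (pvSplit t.toList).map String.ofList := by
    simp [PySem.Str.split?, PySem.Chars.split?, pvSplitOn_newline]
  rw [hlines]
  obtain ⟨tl, htl⟩ := pvSplit_head t.toList
  rw [htl, List.map_cons]
  have hA := pvAloop (tl.map String.ofList) [] []
    (String.ofList (t.toList.takeWhile (fun c => c != '\n')))
  simp only [List.length_nil, Nat.cast_zero, List.nil_append] at hA
  rw [hA]
  rw [← List.map_cons, ← htl, pvAIns_map]
  rw [← String.toList_inj]
  rw [PySem.Str.toList_join]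
  simp only [List.map_map]
  simp only [Function.comp_def, String.toList_ofList, List.map_id_fun', id]
  rw [pvBGo_eq]
  rfl

-- ===== VERDICT (by name: the statement is the Claim_ definition above) =====
theorem format_optimized_answer_spec : Claim_equal_format_optimized_answer := by
  intro text _
  show format_optimized_answer text = format_optimized_answer_alt text
  unfold format_optimized_answer format_optimized_answer_alt
  by_cases h : text = ""
  · rw [if_pos h, if_pos h]
  · rw [if_neg h, if_neg h]
    exact pvMain _
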